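-- pv_equiv track=rewrite | github.com/Tombstone-Research/fund-autopsy | fundautopsy/data/fee_parser.py | _find_class_column
-- ===== SOURCE A (Python) =====
-- def _find_class_column(header_texts: list[str], ticker: str) -> int:
--     """Identify which column index corresponds to the target share class.
--
--     In multi-class tables, the header row contains class names or tickers.
--     Returns 0-based index into the data columns (excluding the label column).
--     """
--     ticker_upper = ticker.upper()
--     for i, text in enumerate(header_texts):
--         if ticker_upper in text.upper():
--             return i
--     # Fall back: check for class name patterns
--     # "Investor Class", "Class I", etc.
--     for i, text in enumerate(header_texts):
--         for label in ("investor", "class i ", "class i\xa0", "class a"):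
--             if label in text.lower():
--                 return i
--     return 0  # default to first column
-- ===== SOURCE B (Python) =====
-- def _find_class_column(header_texts: list[str], ticker: str) -> int:
--     """Single pass: return immediately on ticker match, remember the first
--     class-label candidate, fall back to it (or 0) at the end."""
--     ticker_upper = ticker.upper()
--     labels = ("investor", "class i ", "class i\xa0", "class a")
--     class_idx = None
--     for i, text in enumerate(header_texts):
--         if ticker_upper in text.upper():
--             return i
--         if class_idx is None:
--             low = text.lower()
--             if any(label in low for label in labels):
--                 class_idx = i
--     return class_idx if class_idx is not None else 0
-- ===== Notes on version B (the rewrite author's own statement) =====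
-- stated objective: simpler
-- what changed: Replaces A's two sequential scans (ticker scan over the whole list, then a class-label scan over the whole list) with one pass that returns on a ticker match and carries a 'first class candidate' accumulator.
import Mathlib
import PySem

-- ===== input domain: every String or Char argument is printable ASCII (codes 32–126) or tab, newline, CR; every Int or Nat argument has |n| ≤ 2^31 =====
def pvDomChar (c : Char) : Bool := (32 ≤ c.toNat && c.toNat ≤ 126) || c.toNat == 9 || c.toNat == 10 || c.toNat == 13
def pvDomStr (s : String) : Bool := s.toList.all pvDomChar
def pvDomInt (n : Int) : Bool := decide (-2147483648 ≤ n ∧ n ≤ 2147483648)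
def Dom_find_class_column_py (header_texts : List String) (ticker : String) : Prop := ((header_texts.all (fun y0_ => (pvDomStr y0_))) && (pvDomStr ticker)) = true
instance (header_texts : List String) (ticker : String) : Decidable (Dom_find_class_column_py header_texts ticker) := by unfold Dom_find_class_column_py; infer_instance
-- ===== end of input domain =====

-- B replaces A's two sequential scans with one pass that returns on a ticker
-- match and keeps the first class-label candidate in an accumulator (objective: simpler).

-- ===== PORT A =====
-- the tuple of class labels ("\u00A0" is Python's "\xa0")
def pvLabels : List String := ["investor", "class i ", "class i\u00A0", "class a"]

-- first pass: 'for i, text in enumerate(...): if ticker_upper in text.upper(): return i'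
def pvScanTicker (tu : String) : List String → Int → Option Int
  | [], _ => none
  | t :: rest, i =>
    if PySem.Str.isIn tu (PySem.Str.upper t) then some i else pvScanTicker tu rest (i + 1)

-- inner loop: 'for label in (...): if label in text.lower(): return i' fires iff some label matches
def pvClassMatchA (text : String) : Bool :=
  pvLabels.any (fun label => PySem.Str.isIn label (PySem.Str.lower text))

-- second pass over enumerate(header_texts)
def pvScanClass : List String → Int → Option Int
  | [], _ => none
  | t :: rest, i => if pvClassMatchA t then some i else pvScanClass rest (i + 1)

def find_class_column_py (header_texts : List String) (ticker : String) : Int :=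
  let tu := PySem.Str.upper ticker
  match pvScanTicker tu header_texts 0 with
  | some i => i
  | none =>
    match pvScanClass header_texts 0 with
    | some i => i
    | none => 0

-- ===== PORT B =====
def pvClassMatchB (text : String) : Bool :=
  pvLabels.any (fun label => PySem.Str.isIn label (PySem.Str.lower text))

-- one pass with the 'first class candidate' accumulator
def pvLoopB (tu : String) : List String → Int → Option Int → Int
  | [], _, c => c.getD 0
  | t :: rest, i, c =>
    if PySem.Str.isIn tu (PySem.Str.upper t) then i
    else pvLoopB tu rest (i + 1)
      (if c.isNone && pvClassMatchB t then some i else c)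

def find_class_column_py_alt (header_texts : List String) (ticker : String) : Int :=
  pvLoopB (PySem.Str.upper ticker) header_texts 0 none

-- ===== PRECONDITION & SPEC =====
def Spec_find_class_column_py (header_texts : List String) (ticker : String) (out : Int) : Prop := out = find_class_column_py_alt header_texts ticker
instance (header_texts : List String) (ticker : String) (out : Int) : Decidable (Spec_find_class_column_py header_texts ticker out) := by unfold Spec_find_class_column_py; infer_instance

-- ===== CLAIM (what is proved, stated in full; the proofs are below) =====
def Claim_equal_find_class_column_py : Prop := ∀ (header_texts : List String) (ticker : String), Dom_find_class_column_py header_texts ticker → Spec_find_class_column_py header_texts ticker (find_class_column_py header_texts ticker)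

-- ===== LEMMAS AND PROOFS =====

-- B's single pass equals A's two passes, for any start index and accumulator
theorem pvLoopB_eq (tu : String) (ts : List String) :
    ∀ (i : Int) (c : Option Int),
      pvLoopB tu ts i c =
        match pvScanTicker tu ts i with
        | some j => j
        | none =>
          match c with
          | some j => j
          | none =>
            match pvScanClass ts i with
            | some j => j
            | none => 0 := by
  induction ts with
  | nil => intro i c; cases c <;> rfl
  | cons t rest ih =>
    intro i c
    simp only [pvLoopB, pvScanTicker, pvScanClass]
    by_cases ht : PySem.Str.isIn tu (PySem.Str.upper t) = true
    · simp only [ht, if_true]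
    · simp only [ht, if_false, Bool.false_eq_true]
      rw [ih]
      cases c with
      | some j => simp [Option.isNone]
      | none =>
        by_cases hc : pvClassMatchB t = true
        · simp [Option.isNone, pvClassMatchA, pvClassMatchB] at *
          simp [hc]
        · have hc' : pvClassMatchA t = false := by
            simpa [pvClassMatchA, pvClassMatchB] using hc
          simp [Option.isNone, hc, hc']

-- ===== VERDICT (by name: the statement is the Claim_ definition above) =====
theorem find_class_column_py_spec : Claim_equal_find_class_column_py := by
  intro header_texts ticker _
  unfold Spec_find_class_column_py find_class_column_py find_class_column_py_alt
  rw [pvLoopB_eq]
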